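-- pv_equiv track=rewrite | github.com/VictorienMarette/projetL2 | vicworksheet.py | sub_total
-- ===== SOURCE A (Python) =====
-- def sub_total(i1, i2,j1,j2, K):
--     Xl = len(K)
--     Yl = len(K[0])
--     tot = 0
--     tot2 = 0
--     for i in range(i1,i2+1):
--         for j in range(j1,j2+1):
--             if K[i%(Xl-1)][j%(Yl-1)] == 1:
--                 tot += 1
--             if K[i%(Xl-1)][j%(Yl-1)]:
--                 tot2 += 1
--
--     return tot, tot2
-- ===== SOURCE B (Python) =====
-- def sub_total(i1, i2, j1, j2, K):
--     # Closed-form over one period: for each cell of the (Xl-1) x (Yl-1)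
--     # effective grid, multiply its 0/1 contributions by how many (i, j)
--     # of the query rectangle land on it (counted arithmetically).
--     Xl = len(K)
--     Yl = len(K[0])
--     if i2 < i1 or j2 < j1:
--         return 0, 0
--     m = Xl - 1
--     p = Yl - 1
--     tot = 0
--     tot2 = 0
--     for r in range(m):
--         ci = (i2 - r) // m - (i1 - 1 - r) // m
--         if ci == 0:
--             continue
--         row = K[r]
--         for s in range(p):
--             cj = (j2 - s) // p - (j1 - 1 - s) // p
--             if cj == 0:
--                 continue
--             v = row[s]
--             if v == 1:
--                 tot += ci * cj
--             if v:
--                 tot2 += ci * cj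
--     return tot, tot2
-- ===== Notes on version B (the rewrite author's own statement) =====
-- stated objective: alternative
-- what changed: B replaces A's per-(i,j) double loop over the whole query rectangle by one pass over the (Xl-1)x(Yl-1) period, multiplying each cell's 0/1 contributions by a closed-form count of how many (i,j) of the rectangle land on it (per-cell work instead of per-rectangle-point work).
-- outside the precondition, e.g. on sub_total(0, 0, 0, 1, [[1, 1, 1], [1], [0, 0, 0]]): A returns (2, 2), B returns (2, 2)
import Mathlib
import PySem

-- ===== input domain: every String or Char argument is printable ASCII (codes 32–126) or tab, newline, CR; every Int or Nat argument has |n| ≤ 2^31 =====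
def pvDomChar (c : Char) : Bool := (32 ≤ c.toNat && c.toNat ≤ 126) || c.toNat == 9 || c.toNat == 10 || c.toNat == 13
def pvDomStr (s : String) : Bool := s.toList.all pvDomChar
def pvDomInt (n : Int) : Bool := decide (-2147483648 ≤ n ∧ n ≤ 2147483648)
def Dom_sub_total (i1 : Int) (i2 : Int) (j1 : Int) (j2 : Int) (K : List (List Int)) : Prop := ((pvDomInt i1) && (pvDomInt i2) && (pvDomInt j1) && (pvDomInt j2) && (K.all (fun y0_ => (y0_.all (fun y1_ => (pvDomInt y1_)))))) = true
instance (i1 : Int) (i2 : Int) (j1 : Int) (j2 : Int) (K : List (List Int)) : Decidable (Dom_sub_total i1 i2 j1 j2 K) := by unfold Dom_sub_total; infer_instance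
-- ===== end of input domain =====

-- B replaces A's per-cell double loop over the whole query rectangle by a single pass
-- over the (Xl-1)×(Yl-1) period, weighting each cell's 0/1 contributions by a closed-form
-- count of how many (i,j) of the rectangle land on that cell (per-cell instead of
-- per-rectangle-point work).

-- ===== PORT A =====
-- Literal port of A: K[x][y] is PySem.List.pyGetD (in range on every input Pre_ admits,
-- where Python's indexing returns normally); i % n is PySem.Int.mod.
def sub_total (i1 : Int) (i2 : Int) (j1 : Int) (j2 : Int) (K : List (List Int)) : Int × Int :=
  let Xl : Int := (K.length : Int)
  let Yl : Int := ((PySem.List.pyGetD K 0 []).length : Int)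
  (PySem.List.pyRange i1 (i2 + 1) 1).foldl (fun t i =>
    (PySem.List.pyRange j1 (j2 + 1) 1).foldl (fun t j =>
      let v := PySem.List.pyGetD (PySem.List.pyGetD K (PySem.Int.mod i (Xl - 1)) []) (PySem.Int.mod j (Yl - 1)) 0
      let t1 := if v = 1 then (t.1 + 1, t.2) else t
      if v ≠ 0 then (t1.1, t1.2 + 1) else t1) t) ((0 : Int), (0 : Int))

-- ===== PORT B =====
def sub_total_alt (i1 : Int) (i2 : Int) (j1 : Int) (j2 : Int) (K : List (List Int)) : Int × Int :=
  let Xl : Int := (K.length : Int)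
  let Yl : Int := ((PySem.List.pyGetD K 0 []).length : Int)
  if i2 < i1 ∨ j2 < j1 then ((0 : Int), (0 : Int))
  else
    let m := Xl - 1
    let p := Yl - 1
    (PySem.List.pyRange 0 m 1).foldl (fun t r =>
      let ci := PySem.Int.floordiv (i2 - r) m - PySem.Int.floordiv (i1 - 1 - r) m
      if ci = 0 then t
      else
        let row := PySem.List.pyGetD K r []
        (PySem.List.pyRange 0 p 1).foldl (fun t s =>
          let cj := PySem.Int.floordiv (j2 - s) p - PySem.Int.floordiv (j1 - 1 - s) p
          if cj = 0 then t
          else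
            let v := PySem.List.pyGetD row s 0
            let t1 := if v = 1 then (t.1 + ci * cj, t.2) else t
            if v ≠ 0 then (t1.1, t1.2 + ci * cj) else t1) t) ((0 : Int), (0 : Int))

-- ===== PRECONDITION & SPEC =====
-- Pre_ = inputs where A returns: K nonempty (len(K[0])), and if the rectangle is
-- nonempty then Xl ≥ 2 and Yl ≥ 2 (else the moduli Xl-1 / Yl-1 raise ZeroDivisionError)
-- and every potentially accessed row K[0..Xl-2] is long enough for every column index
-- 0..Yl-2 (else IndexError).  The row clause is slightly narrower than A's exact return
-- set: it also excludes ragged grids whose short row is never actually hit by the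
-- rectangle's residues, where A (and B, which skips unhit residues) still returns.
def Pre_sub_total (i1 : Int) (i2 : Int) (j1 : Int) (j2 : Int) (K : List (List Int)) : Prop :=
  K ≠ [] ∧ (i2 < i1 ∨ j2 < j1 ∨
    (2 ≤ K.length ∧ 2 ≤ (K.headD []).length ∧
      ∀ row ∈ K.take (K.length - 1), (K.headD []).length - 1 ≤ row.length))
instance (i1 : Int) (i2 : Int) (j1 : Int) (j2 : Int) (K : List (List Int)) : Decidable (Pre_sub_total i1 i2 j1 j2 K) := by unfold Pre_sub_total; infer_instance

def pvWitness_sub_total : Int × Int × Int × Int × List (List Int) := (-2, 3, 1, 5, [[1, 0, 2], [0, 1, 1], [2, 2, 0]])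

def Spec_sub_total (i1 : Int) (i2 : Int) (j1 : Int) (j2 : Int) (K : List (List Int)) (out : Int × Int) : Prop := out = sub_total_alt i1 i2 j1 j2 K
instance (i1 : Int) (i2 : Int) (j1 : Int) (j2 : Int) (K : List (List Int)) (out : Int × Int) : Decidable (Spec_sub_total i1 i2 j1 j2 K out) := by unfold Spec_sub_total; infer_instance

-- ===== CLAIM (what is proved, stated in full; the proofs are below) =====
def Claim_equal_sub_total : Prop := ∀ (i1 : Int) (i2 : Int) (j1 : Int) (j2 : Int) (K : List (List Int)), Dom_sub_total i1 i2 j1 j2 K → Pre_sub_total i1 i2 j1 j2 K → Spec_sub_total i1 i2 j1 j2 K (sub_total i1 i2 j1 j2 K)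

-- ===== LEMMAS AND PROOFS =====

-- a fold whose step adds (g1 x, g2 x) componentwise is the pair of sums
theorem pv_foldl_pair {α : Type} (g1 g2 : α → Int) (step : Int × Int → α → Int × Int)
    (hstep : ∀ t x, step t x = (t.1 + g1 x, t.2 + g2 x)) :
    ∀ (L : List α) (t : Int × Int),
      L.foldl step t = (t.1 + (L.map g1).sum, t.2 + (L.map g2).sum) := by
  intro L
  induction L with
  | nil => intro t; simp
  | cons x L ih =>
    intro t
    simp only [List.foldl_cons, List.map_cons, List.sum_cons, ih, hstep]
    simp only [Prod.mk.injEq]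
    constructor <;> ring

theorem pv_ediv_sub_ediv_pred (m x : Int) (hm : 0 < m) :
    x / m - (x - 1) / m = if x % m = 0 then 1 else 0 := by
  have hx := Int.mul_ediv_add_emod x m
  have hexp : m * (x / m - 1) = m * (x / m) - m := by ring
  have h0 : 0 ≤ x % m := Int.emod_nonneg x (by omega)
  have h1 : x % m < m := Int.emod_lt_of_pos x hm
  by_cases h : x % m = 0
  · rw [if_pos h]
    have hx1 : x - 1 = m - 1 + m * (x / m - 1) := by omega
    have e1 : (m - 1 + m * (x / m - 1)) / m = (m - 1) / m + (x / m - 1) :=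
      Int.add_mul_ediv_left _ _ (by omega : m ≠ 0)
    have e2 : (m - 1) / m = 0 := Int.ediv_eq_zero_of_lt (by omega) (by omega)
    rw [hx1, e1, e2]
    omega
  · rw [if_neg h]
    have hx1 : x - 1 = x % m - 1 + m * (x / m) := by omega
    have e1 : (x % m - 1 + m * (x / m)) / m = (x % m - 1) / m + x / m :=
      Int.add_mul_ediv_left _ _ (by omega : m ≠ 0)
    have e2 : (x % m - 1) / m = 0 := Int.ediv_eq_zero_of_lt (by omega) (by omega)
    rw [hx1, e1, e2]
    omega

-- picking the unique matching element out of a duplicate-free list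
theorem pv_sum_delta (g : Int → Int) :
    ∀ (l : List Int), l.Nodup → ∀ c ∈ l,
      (l.map (fun r => (if c = r then 1 else 0) * g r)).sum = g c := by
  intro l
  induction l with
  | nil => intro _ c hc; simp at hc
  | cons a l ih =>
    intro hnd c hc
    simp only [List.map_cons, List.sum_cons]
    rcases List.mem_cons.mp hc with h | h
    · subst h
      rw [if_pos rfl, one_mul]
      have hz : (l.map (fun r => (if c = r then 1 else 0) * g r)).sum = 0 := by
        apply List.sum_eq_zero
        intro y hy
        obtain ⟨r, hr, rfl⟩ := List.mem_map.mp hy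
        have hne : c ≠ r := fun he => (List.nodup_cons.mp hnd).1 (he ▸ hr)
        rw [if_neg hne, zero_mul]
      rw [hz, add_zero]
    · have hne : c ≠ a := fun he => (List.nodup_cons.mp hnd).1 (he ▸ h)
      rw [if_neg hne, zero_mul, zero_add, ih (List.nodup_cons.mp hnd).2 c h]

def pvCnt (a b m r : Int) : Int := (b - r) / m - (a - 1 - r) / m

theorem pv_cnt_succ (a b m r : Int) (hm : 0 < m) (hr0 : 0 ≤ r) (hrm : r < m) :
    pvCnt a b m r = pvCnt a (b - 1) m r + (if PySem.Int.mod b m = r then 1 else 0) := by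
  have hd := pv_ediv_sub_ediv_pred m (b - r) hm
  have hmod : PySem.Int.mod b m = b % m := PySem.Int.mod_eq_emod_of_pos hm
  have hrm' : r % m = r := Int.emod_eq_of_lt hr0 hrm
  have hiff : b % m = r ↔ (b - r) % m = 0 := by
    constructor
    · intro hb
      exact Int.emod_eq_emod_iff_emod_sub_eq_zero.mp (by rw [hrm', hb])
    · intro hz
      have h2 := Int.emod_eq_emod_iff_emod_sub_eq_zero.mpr hz
      rw [hrm'] at h2; exact h2
  unfold pvCnt
  rw [show b - 1 - r = b - r - 1 by ring, hmod]
  by_cases h : b % m = r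
  · rw [if_pos h]
    rw [if_pos (hiff.mp h)] at hd
    omega
  · rw [if_neg h]
    rw [if_neg (fun hz => h (hiff.mpr hz))] at hd
    omega

-- the crux: a sum of g over residues of [a, b] equals counted residues of one period
theorem pv_residue_sum (g : Int → Int) (m : Int) (hm : 0 < m) :
    ∀ (n : Nat) (a b : Int), b + 1 - a = (n : Int) → a ≤ b + 1 →
      ((PySem.List.pyRange a (b + 1) 1).map (fun i => g (PySem.Int.mod i m))).sum
        = ((PySem.List.pyRange 0 m 1).map (fun r => pvCnt a b m r * g r)).sum := by
  intro n
  induction n with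
  | zero =>
    intro a b hn _
    have hba : b + 1 = a := by omega
    have hz : ((PySem.List.pyRange 0 m 1).map (fun r => pvCnt a b m r * g r)).sum = 0 := by
      apply List.sum_eq_zero
      intro y hy
      obtain ⟨r, hr, rfl⟩ := List.mem_map.mp hy
      have hc : pvCnt a b m r = 0 := by
        unfold pvCnt; rw [show b - r = a - 1 - r by omega]; ring
      rw [hc, zero_mul]
    rw [PySem.List.pyRange_one_eq_nil (le_of_eq hba), hz]
    simp
  | succ n ih =>
    intro a b hn hab
    have hab' : a ≤ b := by omega
    rw [PySem.List.pyRange_one_succ_right hab', List.map_append, List.sum_append]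
    have hih := ih a (b - 1) (by omega) (by omega)
    rw [show b - 1 + 1 = b by ring] at hih
    rw [hih]
    have hmap : (PySem.List.pyRange 0 m 1).map (fun r => pvCnt a b m r * g r)
        = (PySem.List.pyRange 0 m 1).map (fun r =>
            pvCnt a (b - 1) m r * g r + (if PySem.Int.mod b m = r then 1 else 0) * g r) := by
      apply List.map_congr_left
      intro r hr
      have hrb := (PySem.List.mem_pyRange_one).mp hr
      rw [pv_cnt_succ a b m r hm hrb.1 hrb.2]; ring
    rw [hmap, PySem.List.sum_map_add_int]
    have hmem : PySem.Int.mod b m ∈ PySem.List.pyRange 0 m 1 :=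
      (PySem.List.mem_pyRange_one).mpr ⟨PySem.Int.mod_nonneg b hm, PySem.Int.mod_lt b hm⟩
    rw [pv_sum_delta g _ (PySem.List.nodup_pyRange_one 0 m) _ hmem]
    simp

-- proof-side abbreviations for the two 0/1 weights, the cell lookup, and the counts
def pvF1 (v : Int) : Int := if v = 1 then 1 else 0
def pvF2 (v : Int) : Int := if v ≠ 0 then 1 else 0
def pvCell (K : List (List Int)) (r s : Int) : Int :=
  PySem.List.pyGetD (PySem.List.pyGetD K r []) s 0
def pvCI (a b m r : Int) : Int :=
  PySem.Int.floordiv (b - r) m - PySem.Int.floordiv (a - 1 - r) m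
def pvS (j1 j2 p : Int) (K : List (List Int)) (f : Int → Int) (r : Int) : Int :=
  ((PySem.List.pyRange j1 (j2 + 1) 1).map (fun j => f (pvCell K r (PySem.Int.mod j p)))).sum
def pvG (i1 i2 j1 j2 m p : Int) (K : List (List Int)) (f : Int → Int) (r : Int) : Int :=
  ((PySem.List.pyRange 0 p 1).map (fun s => pvCI i1 i2 m r * pvCI j1 j2 p s * f (pvCell K r s))).sum

-- A's nested fold is the pair of nested sums of the two weights
theorem pv_A_eq (i1 i2 j1 j2 : Int) (K : List (List Int)) :
    sub_total i1 i2 j1 j2 K =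
      (((0 : Int), (0 : Int)).1 + ((PySem.List.pyRange i1 (i2 + 1) 1).map
          (fun i => pvS j1 j2 (((PySem.List.pyGetD K 0 []).length : Int) - 1) K pvF1 (PySem.Int.mod i ((K.length : Int) - 1)))).sum,
       ((0 : Int), (0 : Int)).2 + ((PySem.List.pyRange i1 (i2 + 1) 1).map
          (fun i => pvS j1 j2 (((PySem.List.pyGetD K 0 []).length : Int) - 1) K pvF2 (PySem.Int.mod i ((K.length : Int) - 1)))).sum) := by
  simp only [sub_total]
  apply pv_foldl_pair
  intro t i
  unfold pvS
  apply pv_foldl_pair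
  intro t j
  unfold pvF1 pvF2 pvCell
  split_ifs <;> simp_all

-- B's guarded fold is the pair of nested weighted sums
theorem pv_B_eq (i1 i2 j1 j2 : Int) (K : List (List Int)) (hne : ¬(i2 < i1 ∨ j2 < j1)) :
    sub_total_alt i1 i2 j1 j2 K =
      (((0 : Int), (0 : Int)).1 + ((PySem.List.pyRange 0 ((K.length : Int) - 1) 1).map
          (pvG i1 i2 j1 j2 ((K.length : Int) - 1) (((PySem.List.pyGetD K 0 []).length : Int) - 1) K pvF1)).sum,
       ((0 : Int), (0 : Int)).2 + ((PySem.List.pyRange 0 ((K.length : Int) - 1) 1).map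
          (pvG i1 i2 j1 j2 ((K.length : Int) - 1) (((PySem.List.pyGetD K 0 []).length : Int) - 1) K pvF2)).sum) := by
  simp only [sub_total_alt, if_neg hne]
  apply pv_foldl_pair
  intro t r
  by_cases hci : PySem.Int.floordiv (i2 - r) ((K.length : Int) - 1) - PySem.Int.floordiv (i1 - 1 - r) ((K.length : Int) - 1) = 0
  · simp only [if_pos hci]
    have hz : ∀ f : Int → Int, pvG i1 i2 j1 j2 ((K.length : Int) - 1) (((PySem.List.pyGetD K 0 []).length : Int) - 1) K f r = 0 := by
      intro f
      unfold pvG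
      apply List.sum_eq_zero
      intro y hy
      obtain ⟨s, hs, rfl⟩ := List.mem_map.mp hy
      unfold pvCI
      rw [hci, zero_mul, zero_mul]
    rw [hz pvF1, hz pvF2, add_zero, add_zero]
  · simp only [if_neg hci]
    unfold pvG
    apply pv_foldl_pair
    intro t s
    by_cases hcj : PySem.Int.floordiv (j2 - s) (((PySem.List.pyGetD K 0 []).length : Int) - 1) - PySem.Int.floordiv (j1 - 1 - s) (((PySem.List.pyGetD K 0 []).length : Int) - 1) = 0
    · simp only [if_pos hcj]
      unfold pvCI
      rw [hcj]
      simp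
    · simp only [if_neg hcj]
      unfold pvF1 pvF2 pvCell pvCI
      split_ifs <;> simp_all

-- one component: A's nested residue sum = B's counted one-period sum
theorem pv_comp (i1 i2 j1 j2 m p : Int) (K : List (List Int)) (f : Int → Int)
    (hm : 0 < m) (hp : 0 < p) (hi : i1 ≤ i2 + 1) (hj : j1 ≤ j2 + 1) :
    ((PySem.List.pyRange i1 (i2 + 1) 1).map (fun i => pvS j1 j2 p K f (PySem.Int.mod i m))).sum
      = ((PySem.List.pyRange 0 m 1).map (pvG i1 i2 j1 j2 m p K f)).sum := by
  rw [pv_residue_sum (pvS j1 j2 p K f) m hm (i2 + 1 - i1).toNat i1 i2 (by omega) hi]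
  have hpt : ∀ r, pvCnt i1 i2 m r * pvS j1 j2 p K f r = pvG i1 i2 j1 j2 m p K f r := by
    intro r
    unfold pvS pvG
    rw [pv_residue_sum (fun s => f (pvCell K r s)) p hp (j2 + 1 - j1).toNat j1 j2 (by omega) hj]
    rw [← List.sum_map_mul_left]
    apply congrArg List.sum
    apply List.map_congr_left
    intro s _
    unfold pvCI pvCnt
    rw [PySem.Int.floordiv_eq_ediv_of_pos hm, PySem.Int.floordiv_eq_ediv_of_pos hm,
      PySem.Int.floordiv_eq_ediv_of_pos hp, PySem.Int.floordiv_eq_ediv_of_pos hp]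
    ring
  simp only [hpt]

-- ===== VERDICT (by name: the statement is the Claim_ definition above) =====
theorem sub_total_spec : Claim_equal_sub_total := by
  intro i1 i2 j1 j2 K _ hpre
  unfold Spec_sub_total
  obtain ⟨hK, hcase⟩ := hpre
  by_cases hi : i2 < i1
  · simp only [sub_total, sub_total_alt, if_pos (Or.inl hi)]
    rw [PySem.List.pyRange_one_eq_nil (by omega : i2 + 1 ≤ i1)]
    simp
  by_cases hj : j2 < j1
  · simp only [sub_total, sub_total_alt, if_pos (Or.inr hj)]
    rw [show PySem.List.pyRange j1 (j2 + 1) 1 = [] from PySem.List.pyRange_one_eq_nil (by omega)]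
    refine Eq.trans (pv_foldl_pair (fun _ : Int => (0 : Int)) (fun _ : Int => (0 : Int)) _ (fun t x => by simp) _ _) ?_
    simp
  -- main case: both ranges nonempty
  rcases hcase with h | h | ⟨hX2, hY2, hrows⟩
  · omega
  · omega
  have hX2' : (2 : Int) ≤ (K.length : Int) := by exact_mod_cast hX2
  have hg0 : PySem.List.pyGetD K 0 [] = K.headD [] := by
    cases K with
    | nil => exact absurd rfl hK
    | cons a l => simp [PySem.List.pyGetD]
  have hY2' : (2 : Int) ≤ ((PySem.List.pyGetD K 0 []).length : Int) := by
    rw [hg0]; exact_mod_cast hY2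
  rw [pv_A_eq, pv_B_eq i1 i2 j1 j2 K (by omega)]
  simp only [Prod.mk.injEq]
  constructor
  · exact congrArg (HAdd.hAdd _) (pv_comp i1 i2 j1 j2 _ _ K pvF1 (by omega) (by omega) (by omega) (by omega))
  · exact congrArg (HAdd.hAdd _) (pv_comp i1 i2 j1 j2 _ _ K pvF2 (by omega) (by omega) (by omega) (by omega))
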